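-- pv_equiv track=rewrite | github.com/DaYe03/custom_qr | qr_code/qr_code.py | _get_line_penalty
-- ===== SOURCE A (Python) =====
-- def _get_line_penalty(line):
--     count = 0
--     counting = None
--     penalty = 0
--
--     for cell in line:
--         if cell != counting:
--             counting = cell
--             count = 1
--         else:
--             count += 1
--             if count == 5:
--                 penalty += 3
--             elif count > 5:
--                 penalty += 1
--
--     return penalty
-- ===== SOURCE B (Python) =====
-- def _get_line_penalty(line):
--     # Run-length segmentation: split the line into maximal runs of equal
--     # cells; a run of length L >= 5 contributes L - 2 (3 for the fifth
--     # cell plus 1 per extra cell), shorter runs contribute nothing.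
--     penalty = 0
--     i = 0
--     n = len(line)
--     while i < n:
--         j = i
--         while j < n and line[j] == line[i]:
--             j += 1
--         L = j - i
--         if L >= 5:
--             penalty += L - 2
--         i = j
--     return penalty
-- ===== Notes on version B (the rewrite author's own statement) =====
-- stated objective: simpler
-- what changed: Replaces the cell-by-cell accumulator with count/counting state by run-length segmentation: split the line into maximal runs and add the closed-form L-2 for each run of length L>=5.
import Mathlib
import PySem

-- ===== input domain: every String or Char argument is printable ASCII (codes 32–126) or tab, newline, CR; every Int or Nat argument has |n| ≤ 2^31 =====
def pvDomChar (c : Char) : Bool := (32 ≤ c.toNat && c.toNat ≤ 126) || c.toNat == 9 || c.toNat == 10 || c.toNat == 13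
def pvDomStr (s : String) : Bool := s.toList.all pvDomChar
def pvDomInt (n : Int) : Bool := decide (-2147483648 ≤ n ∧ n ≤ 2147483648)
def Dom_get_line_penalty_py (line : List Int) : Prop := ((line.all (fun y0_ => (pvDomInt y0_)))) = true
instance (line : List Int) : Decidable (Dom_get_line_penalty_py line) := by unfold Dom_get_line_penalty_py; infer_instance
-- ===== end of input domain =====

-- B replaces A's cell-by-cell count/counting accumulator by run-length
-- segmentation with a closed-form L-2 per run of length L ≥ 5 (objective: simpler).

-- ===== PORT A =====
-- the for-loop of A, state (count, counting, penalty) carried as arguments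
def pvLoopA : List Int → Int → Option Int → Int → Int
  | [], _count, _counting, penalty => penalty
  | cell :: rest, count, counting, penalty =>
    if some cell ≠ counting then
      pvLoopA rest 1 (some cell) penalty
    else
      if count + 1 = 5 then pvLoopA rest (count + 1) counting (penalty + 3)
      else if count + 1 > 5 then pvLoopA rest (count + 1) counting (penalty + 1)
      else pvLoopA rest (count + 1) counting penalty

def get_line_penalty_py (line : List Int) : Int := pvLoopA line 0 none 0

-- ===== PORT B =====
-- outer while-loop of Source B: one step per maximal run (the inner scan is takeWhile/dropWhile)
def get_line_penalty_py_alt : List Int → Int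
  | [] => 0
  | x :: rest =>
    let L : Nat := (rest.takeWhile (· == x)).length + 1
    (if 5 ≤ L then (L : Int) - 2 else 0) + get_line_penalty_py_alt (rest.dropWhile (· == x))
termination_by l => l.length
decreasing_by
  simpa using Nat.lt_succ_of_le (List.length_dropWhile_le (· == x) rest)

-- ===== PRECONDITION & SPEC =====
def Spec_get_line_penalty_py (line : List Int) (out : Int) : Prop := out = get_line_penalty_py_alt line
instance (line : List Int) (out : Int) : Decidable (Spec_get_line_penalty_py line out) := by unfold Spec_get_line_penalty_py; infer_instance

-- ===== CLAIM (what is proved, stated in full; the proofs are below) =====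
def Claim_equal_get_line_penalty_py : Prop := ∀ (line : List Int), Dom_get_line_penalty_py line → Spec_get_line_penalty_py line (get_line_penalty_py line)

-- ===== LEMMAS AND PROOFS =====

-- closed-form contribution of a run that has reached length n
def pvPen (n : Int) : Int := if 5 ≤ n then n - 2 else 0

theorem pvLoopA_add (xs : List Int) : ∀ (c : Int) (v : Option Int) (p : Int),
    pvLoopA xs c v p = p + pvLoopA xs c v 0 := by
  induction xs with
  | nil => intro c v p; simp [pvLoopA]
  | cons x rest ih =>
    intro c v p
    simp only [pvLoopA]
    split_ifs with h1 h2 h3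
    · exact ih 1 (some x) p
    · rw [ih (c + 1) v (p + 3), ih (c + 1) v (0 + 3)]; ring
    · rw [ih (c + 1) v (p + 1), ih (c + 1) v (0 + 1)]; ring
    · exact ih (c + 1) v p

theorem pvLoopA_run (xs : List Int) : ∀ (v count : Int), 1 ≤ count →
    pvLoopA xs count (some v) 0 =
      pvPen (count + ((xs.takeWhile (· == v)).length : Int)) - pvPen count +
        pvLoopA (xs.dropWhile (· == v)) 0 none 0 := by
  induction xs with
  | nil =>
    intro v count _
    simp [pvLoopA, List.takeWhile_nil, List.dropWhile_nil]
  | cons x rest ih =>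
    intro v count hc
    by_cases hxv : x = v
    · subst hxv
      have hstep : pvLoopA (x :: rest) count (some x) 0 =
          (pvPen (count + 1) - pvPen count) + pvLoopA rest (count + 1) (some x) 0 := by
        simp only [pvLoopA]
        rw [if_neg (by simp)]
        split_ifs with h1 h2
        · have h3 : pvPen (count + 1) - pvPen count = 3 := by
            unfold pvPen; split_ifs <;> omega
          rw [pvLoopA_add, h3]; ring
        · have h3 : pvPen (count + 1) - pvPen count = 1 := by
            unfold pvPen; split_ifs <;> omega
          rw [pvLoopA_add, h3]; ring
        · have h3 : pvPen (count + 1) - pvPen count = 0 := by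
            unfold pvPen; split_ifs <;> omega
          rw [h3]; ring
      rw [hstep, ih x (count + 1) (by omega)]
      simp only [List.takeWhile_cons, List.dropWhile_cons, BEq.rfl, if_true,
        List.length_cons]
      push_cast
      ring
    · have hne : (x == v) = false := by simp [hxv]
      have h1 : pvLoopA (x :: rest) count (some v) 0 = pvLoopA rest 1 (some x) 0 := by
        simp [pvLoopA, hxv]
      have h2 : pvLoopA (x :: rest) 0 none 0 = pvLoopA rest 1 (some x) 0 := by
        simp [pvLoopA]
      rw [h1]
      simp only [List.takeWhile_cons, List.dropWhile_cons, hne]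
      rw [← h2]
      simp

theorem pv_main : ∀ (line : List Int), pvLoopA line 0 none 0 = get_line_penalty_py_alt line := by
  intro line
  induction line using get_line_penalty_py_alt.induct with
  | case1 => simp [pvLoopA, get_line_penalty_py_alt]
  | case2 x rest ih =>
    have h0 : pvLoopA (x :: rest) 0 none 0 = pvLoopA rest 1 (some x) 0 := by
      simp [pvLoopA]
    rw [h0, pvLoopA_run rest x 1 le_rfl, ih]
    rw [get_line_penalty_py_alt]
    have hpen : pvPen (1 + ((rest.takeWhile (· == x)).length : Int)) =
        (if 5 ≤ (rest.takeWhile (· == x)).length + 1 then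
          (((rest.takeWhile (· == x)).length + 1 : Nat) : Int) - 2 else 0) := by
      unfold pvPen
      split_ifs <;> push_cast <;> omega
    have hpen1 : pvPen 1 = 0 := by unfold pvPen; norm_num
    rw [hpen, hpen1]
    ring

-- ===== VERDICT (by name: the statement is the Claim_ definition above) =====
theorem get_line_penalty_py_spec : Claim_equal_get_line_penalty_py := by
  intro line _
  unfold Spec_get_line_penalty_py get_line_penalty_py
  exact pv_main line
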